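-- pv_equiv track=rewrite | github.com/luis2ra/py3-platzi-algorithms-arrays-and-strings | 02-two-prompters/class07-verifying-alien-dictionary.py | two_words
-- ===== SOURCE A (Python) =====
-- def two_words(word1, word2, order):
--     try:
--         index1 = order.index(word1[0])
--     except:
--         return False
--
--     try:
--         index2 = order.index(word2[0])
--     except:
--         return True
--
--     if index1 < index2:
--         return False
--     if index1 > index2:
--         return True
--     return two_words(word1[1:], word2[1:], order)
-- ===== SOURCE B (Python) =====
-- def two_words(word1, word2, order):
--     # Rank each word once against a first-index table, then compare the
--     # rank sequences with Python's lexicographic list comparison.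
--     rank = {}
--     for i, c in enumerate(order):
--         rank.setdefault(c, i)
--
--     def key(w):
--         ks = []
--         for c in w:
--             r = rank.get(c, -1)
--             ks.append(r)
--             if r < 0:
--                 return ks
--         ks.append(-1)
--         return ks
--
--     return key(word1) > key(word2)
-- ===== Notes on version B (the rewrite author's own statement) =====
-- stated objective: faster
-- what changed: Replaces the per-step order.index recursion with a first-index rank dict built once, ranking each word into a sentinel-terminated key list and comparing the two keys with Python's lexicographic list comparison.
import Mathlib
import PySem

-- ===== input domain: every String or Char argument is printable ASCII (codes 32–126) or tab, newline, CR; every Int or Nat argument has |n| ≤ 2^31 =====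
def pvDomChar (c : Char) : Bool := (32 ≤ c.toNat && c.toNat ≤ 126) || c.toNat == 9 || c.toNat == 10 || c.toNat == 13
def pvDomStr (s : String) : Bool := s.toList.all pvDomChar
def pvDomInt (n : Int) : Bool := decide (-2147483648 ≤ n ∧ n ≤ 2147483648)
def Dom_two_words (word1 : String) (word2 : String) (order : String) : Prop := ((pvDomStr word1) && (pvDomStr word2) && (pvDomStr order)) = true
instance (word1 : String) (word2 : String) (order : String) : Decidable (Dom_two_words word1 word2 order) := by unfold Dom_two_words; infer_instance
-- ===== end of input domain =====

-- B replaces A's per-step `order.index` recursion by ranking each word once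
-- against a first-index table and comparing the rank lists lexicographically
-- (objective: alternative decomposition; same exact result).

-- ===== PORT A =====
-- try: order.index(word1[0]) — fails iff word1 is empty (IndexError) or the
-- char is not in order (ValueError); both excepts are bare, so `none` covers both.
def two_words_go (word1 : List Char) (word2 : List Char) (order : List Char) : Bool :=
  match word1 with
  | [] => false
  | c1 :: t1 =>
    match PySem.List.index? order c1 with
    | none => false
    | some index1 =>
      match word2 with
      | [] => true
      | c2 :: t2 =>
        match PySem.List.index? order c2 with
        | none => true
        | some index2 =>
          if index1 < index2 then false
          else if index1 > index2 then true
          else two_words_go t1 t2 order   -- word1[1:], word2[1:]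

def two_words (word1 : String) (word2 : String) (order : String) : Bool :=
  two_words_go word1.toList word2.toList order.toList

-- ===== PORT B =====
-- rank = {}; for i, c in enumerate(order): rank.setdefault(c, i)
def two_words_rank (order : List Char) : PySem.Dict Char Int :=
  (PySem.List.enumerate order 0).foldl (fun d p => d.setdefault p.2 p.1) PySem.Dict.empty

-- def key(w): ks = []; for c in w: r = rank.get(c,-1); ks.append(r); if r<0: return ks; ks.append(-1); return ks
def two_words_key (rank : PySem.Dict Char Int) (w : List Char) : List Int :=
  match w with
  | [] => [-1]
  | c :: t =>
    let r := rank.getD c (-1)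
    if r < 0 then [r] else r :: two_words_key rank t

-- Python's lexicographic `>` on lists of ints
def two_words_listGt (x : List Int) (y : List Int) : Bool :=
  match x, y with
  | [], _ => false
  | _ :: _, [] => true
  | a :: xs, b :: ys =>
    if a > b then true else if a < b then false else two_words_listGt xs ys

def two_words_alt (word1 : String) (word2 : String) (order : String) : Bool :=
  let rank := two_words_rank order.toList
  two_words_listGt (two_words_key rank word1.toList) (two_words_key rank word2.toList)

-- ===== PRECONDITION & SPEC =====
def Spec_two_words (word1 : String) (word2 : String) (order : String) (out : Bool) : Prop := out = two_words_alt word1 word2 order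
instance (word1 : String) (word2 : String) (order : String) (out : Bool) : Decidable (Spec_two_words word1 word2 order out) := by unfold Spec_two_words; infer_instance

-- ===== CLAIM (what is proved, stated in full; the proofs are below) =====
def Claim_equal_two_words : Prop := ∀ (word1 : String) (word2 : String) (order : String), Dom_two_words word1 word2 order → Spec_two_words word1 word2 order (two_words word1 word2 order)

-- ===== LEMMAS AND PROOFS =====

-- the setdefault fold keeps the FIRST index of each char
theorem two_words_rank_fold_get? (l : List Char) (s : Int) (d : PySem.Dict Char Int) (c : Char) :
    ((PySem.List.enumerate l s).foldl (fun d p => d.setdefault p.2 p.1) d).get? c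
      = ((d.get? c).or ((PySem.List.index? l c).map (fun k => s + (k : Int)))) := by
  induction l generalizing s d with
  | nil =>
    rw [PySem.List.enumerate_nil]
    simp [PySem.List.index?_eq_idxOf?, List.idxOf?]
  | cons x t ih =>
    rw [PySem.List.enumerate_cons, List.foldl_cons, ih]
    by_cases hx : x = c
    · subst hx
      rw [PySem.Dict.get?_setdefault_self, PySem.List.index?_cons_self]
      cases hd : d.get? x <;> simp
    · rw [PySem.List.index?_cons_of_ne t hx,
          PySem.Dict.get?_setdefault_of_ne d s (fun h => hx h.symm)]
      cases ht : PySem.List.index? t c <;> cases hd : d.get? c <;> (simp; try omega)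
theorem two_words_rank_get? (order : List Char) (c : Char) :
    (two_words_rank order).get? c = (PySem.List.index? order c).map (fun k => (k : Int)) := by
  unfold two_words_rank
  rw [two_words_rank_fold_get?]
  cases h : PySem.List.index? order c <;> simp [PySem.Dict.get?_empty]

theorem two_words_key_of_none (order : List Char) (c : Char) (t : List Char)
    (h : PySem.List.index? order c = none) :
    two_words_key (two_words_rank order) (c :: t) = [-1] := by
  have hg : (two_words_rank order).get? c = none := by rw [two_words_rank_get?, h]; rfl
  simp [two_words_key, PySem.Dict.getD_eq_get?_getD, hg]

theorem two_words_key_of_some (order : List Char) (c : Char) (t : List Char) (i : Nat)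
    (h : PySem.List.index? order c = some i) :
    two_words_key (two_words_rank order) (c :: t)
      = (i : Int) :: two_words_key (two_words_rank order) t := by
  have hg : (two_words_rank order).get? c = some (i : Int) := by rw [two_words_rank_get?, h]; rfl
  simp only [two_words_key, PySem.Dict.getD_eq_get?_getD, hg, Option.getD_some]
  rw [if_neg (not_lt.mpr (Int.natCast_nonneg i))]

-- a key is either exactly [-1] or starts with a (cast) index
theorem two_words_key_shape (order : List Char) (w : List Char) :
    two_words_key (two_words_rank order) w = [-1] ∨
      ∃ (i : Nat) (t : List Int), two_words_key (two_words_rank order) w = (i : Int) :: t := by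
  cases w with
  | nil => left; rfl
  | cons c t =>
    cases h : PySem.List.index? order c with
    | none => left; exact two_words_key_of_none order c t h
    | some i => right; exact ⟨i, _, two_words_key_of_some order c t i h⟩

theorem two_words_listGt_neg_one (order : List Char) (w : List Char) :
    two_words_listGt [-1] (two_words_key (two_words_rank order) w) = false := by
  rcases two_words_key_shape order w with h | ⟨i, t, h⟩ <;> rw [h]
  · decide
  · simp only [two_words_listGt]
    rw [if_neg (by omega)]
    split
    · rfl
    · rfl

-- the heart: A's recursion equals B's key comparison
theorem two_words_go_eq (order : List Char) (w1 w2 : List Char) :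
    two_words_go w1 w2 order
      = two_words_listGt (two_words_key (two_words_rank order) w1)
          (two_words_key (two_words_rank order) w2) := by
  induction w1 generalizing w2 with
  | nil =>
    rw [show two_words_key (two_words_rank order) [] = [-1] from rfl,
        two_words_listGt_neg_one]
    rfl
  | cons c1 t1 ih =>
    cases h1 : PySem.List.index? order c1 with
    | none =>
      rw [two_words_key_of_none order c1 t1 h1, two_words_listGt_neg_one]
      simp only [two_words_go, h1]
    | some i1 =>
      rw [two_words_key_of_some order c1 t1 i1 h1]
      cases w2 with
      | nil =>
        rw [show two_words_key (two_words_rank order) [] = [-1] from rfl]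
        simp only [two_words_go, h1, two_words_listGt]
        rw [if_pos (by omega)]
      | cons c2 t2 =>
        cases h2 : PySem.List.index? order c2 with
        | none =>
          rw [two_words_key_of_none order c2 t2 h2]
          simp only [two_words_go, h1, h2, two_words_listGt]
          rw [if_pos (by omega)]
        | some i2 =>
          rw [two_words_key_of_some order c2 t2 i2 h2]
          simp only [two_words_go, h1, h2, two_words_listGt, ih]
          rcases Nat.lt_trichotomy i1 i2 with h | h | h
          · rw [if_neg (show ¬ ((i1:Int) > (i2:Int)) by omega),
                if_pos (show ((i1:Int) < (i2:Int)) by omega)]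
            simp [h]
          · subst h
            rw [if_neg (show ¬ ((i1:Int) > (i1:Int)) by omega),
                if_neg (show ¬ ((i1:Int) < (i1:Int)) by omega)]
            simp
          · rw [if_pos (show ((i1:Int) > (i2:Int)) by omega)]
            have h' : ¬ i1 < i2 := by omega
            simp [h, h']

-- ===== VERDICT (by name: the statement is the Claim_ definition above) =====
theorem two_words_spec : Claim_equal_two_words := by
  intro word1 word2 order _
  show two_words word1 word2 order = two_words_alt word1 word2 order
  unfold two_words two_words_alt
  exact two_words_go_eq _ _ _
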